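-- pv_equiv track=rewrite | github.com/luandnh/CodeLearnTraining.Python | SumOfInteger.py | sumOfInteger
-- ===== SOURCE A (Python) =====
-- def sumOfInteger(n, x, y):
--     total = 0
--     for i in range(1, n+1):
--         if (str(i).count(str(x)) >= 1) or (str(i).count(str(y)) >= 1):
--             continue
--         else:
--             total +=i
--     return total
-- ===== SOURCE B (Python) =====
-- def sumOfInteger(n, x, y):
--     if n < 1:
--         return 0
--     sx, sy = str(x), str(y)
--     bad = 0
--     for i in range(1, n + 1):
--         if sx in str(i) or sy in str(i):
--             bad += i
--     return n * (n + 1) // 2 - bad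
-- ===== Notes on version B (the rewrite author's own statement) =====
-- stated objective: alternative
-- what changed: B computes the total of 1..n by the Gauss closed form n(n+1)//2 and subtracts the sum of excluded numbers detected with the substring 'in' operator, instead of accumulating the kept numbers with str.count tests as A does.
import Mathlib
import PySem

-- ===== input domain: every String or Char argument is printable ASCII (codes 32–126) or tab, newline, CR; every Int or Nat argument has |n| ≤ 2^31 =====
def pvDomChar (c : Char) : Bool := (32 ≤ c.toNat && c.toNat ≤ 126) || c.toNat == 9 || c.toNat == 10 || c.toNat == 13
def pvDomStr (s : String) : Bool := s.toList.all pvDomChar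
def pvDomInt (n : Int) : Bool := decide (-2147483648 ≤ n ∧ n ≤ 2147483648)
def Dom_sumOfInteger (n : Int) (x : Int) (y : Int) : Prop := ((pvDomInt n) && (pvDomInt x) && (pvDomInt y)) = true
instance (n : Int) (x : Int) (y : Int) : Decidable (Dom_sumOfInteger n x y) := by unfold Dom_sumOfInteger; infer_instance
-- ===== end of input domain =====

-- B replaces A's keep-accumulating loop by the Gauss closed form n(n+1)//2 minus the
-- sum of the excluded numbers found with substring membership (alternative decomposition).


-- ===== PORT A =====
-- for i in range(1, n+1): if str(i).count(str(x)) >= 1 or str(i).count(str(y)) >= 1: continue else: total += i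
def sumOfInteger (n : Int) (x : Int) (y : Int) : Int :=
  (PySem.List.pyRange 1 (n + 1) 1).foldl
    (fun total i =>
      if 1 ≤ PySem.Str.count (PySem.Int.toStr i) (PySem.Int.toStr x)
          ∨ 1 ≤ PySem.Str.count (PySem.Int.toStr i) (PySem.Int.toStr y)
      then total
      else total + i) 0

-- ===== PORT B =====
-- if n < 1: 0; else n(n+1)//2 minus the loop summing the i with sx in str(i) or sy in str(i)
def sumOfInteger_alt (n : Int) (x : Int) (y : Int) : Int :=
  if n < 1 then 0
  else
    let sx := PySem.Int.toStr x
    let sy := PySem.Int.toStr y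
    let bad := (PySem.List.pyRange 1 (n + 1) 1).foldl
      (fun bad i =>
        if PySem.Str.isIn sx (PySem.Int.toStr i) = true
            ∨ PySem.Str.isIn sy (PySem.Int.toStr i) = true
        then bad + i
        else bad) 0
    PySem.Int.floordiv (n * (n + 1)) 2 - bad

-- ===== PRECONDITION & SPEC =====
def Spec_sumOfInteger (n : Int) (x : Int) (y : Int) (out : Int) : Prop := out = sumOfInteger_alt n x y
instance (n : Int) (x : Int) (y : Int) (out : Int) : Decidable (Spec_sumOfInteger n x y out) := by unfold Spec_sumOfInteger; infer_instance

-- ===== CLAIM (what is proved, stated in full; the proofs are below) =====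
def Claim_equal_sumOfInteger : Prop := ∀ (n : Int) (x : Int) (y : Int), Dom_sumOfInteger n x y → Spec_sumOfInteger n x y (sumOfInteger n x y)

-- ===== LEMMAS AND PROOFS =====

-- str(i) is never the empty string
theorem pv_toChars_ne_nil (m : Int) : PySem.Int.toChars m ≠ [] := by
  unfold PySem.Int.toChars
  split
  · simp
  · exact List.ne_nil_of_length_pos Nat.length_toDigits_pos

-- count.go never decreases the accumulator
theorem pv_go_mono (sub : List Char) (fuel : Nat) (s : List Char) (acc : Nat) :
    acc ≤ PySem.Chars.count.go sub fuel s acc := by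
  induction fuel generalizing s acc with
  | zero => simp [PySem.Chars.count.go]
  | succ fuel ih =>
    cases s with
    | nil => simp [PySem.Chars.count.go]
    | cons h t =>
      simp only [PySem.Chars.count.go]
      split
      · exact le_trans (Nat.le_succ acc) (ih _ _)
      · exact ih _ _

-- count.go stays at acc exactly when sub does not occur
theorem pv_go_eq_acc_iff (sub : List Char) (hsub : sub ≠ []) (fuel : Nat) :
    ∀ (s : List Char) (acc : Nat), s.length ≤ fuel →
      (PySem.Chars.count.go sub fuel s acc = acc ↔ ¬ sub <:+: s) := by
  induction fuel with
  | zero =>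
    intro s acc hlen
    have hs : s = [] := List.length_eq_zero_iff.mp (Nat.le_zero.mp hlen)
    subst hs
    simp [PySem.Chars.count.go, List.infix_nil, hsub]
  | succ fuel ih =>
    intro s acc hlen
    cases s with
    | nil => simp [PySem.Chars.count.go, List.infix_nil, hsub]
    | cons h t =>
      simp only [PySem.Chars.count.go]
      by_cases hp : sub.isPrefixOf (h :: t) = true
      · simp only [hp, if_true]
        constructor
        · intro heq
          have := pv_go_mono sub fuel ((h :: t).drop sub.length) (acc + 1)
          omega
        · intro hni
          exact absurd ((List.isPrefixOf_iff_prefix.mp hp).isInfix) hni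
      · rw [if_neg (by simp [hp])]
        have hpre : ¬ sub <+: (h :: t) := fun hc => hp (List.isPrefixOf_iff_prefix.mpr hc)
        rw [ih t acc (by simpa using Nat.lt_succ_iff.mp (Nat.lt_of_lt_of_le (Nat.lt_succ_self _) hlen))]
        rw [List.infix_cons_iff]
        tauto
  
-- A's test 'count ≥ 1' is B's test 'sub in s' (for a nonempty needle)
theorem pv_count_pos_iff (s sub : List Char) (hsub : sub ≠ []) :
    1 ≤ PySem.Chars.count s sub ↔ PySem.Chars.isIn sub s = true := by
  rw [PySem.Chars.isIn_iff_infix]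
  unfold PySem.Chars.count
  rw [if_neg (by simpa using hsub)]
  have h := pv_go_eq_acc_iff sub hsub s.length s 0 le_rfl
  have hm := pv_go_mono sub s.length s 0
  constructor
  · intro h1
    by_contra hni
    have := h.mpr hni
    omega
  · intro hi
    rcases Nat.eq_or_lt_of_le hm with he | hl
    · exact absurd (h.mp he.symm) (by simpa using hi)
    · omega

-- splitting a keep/drop fold pair: keep-fold + drop-fold = initials + sum
theorem pv_fold_split (p : Int → Prop) [DecidablePred p] (l : List Int) :
    ∀ (a b : Int),
      l.foldl (fun t i => if p i then t else t + i) a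
        + l.foldl (fun t i => if p i then t + i else t) b
      = a + b + l.sum := by
  induction l with
  | nil => intro a b; simp
  | cons h t ih =>
    intro a b
    simp only [List.foldl_cons, List.sum_cons]
    by_cases hp : p h
    · rw [if_pos hp, if_pos hp, ih]; ring
    · rw [if_neg hp, if_neg hp, ih]; ring

-- Gauss: the sum of range(1, m+1)
theorem pv_gauss (m : Nat) : (PySem.List.pyRange 1 ((m : Int) + 1) 1).sum * 2 = (m : Int) * (m + 1) := by
  induction m with
  | zero => simp [PySem.List.pyRange_one_eq_nil]
  | succ k ih =>
    have h : (1 : Int) ≤ (k : Int) + 1 := by omega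
    rw [show ((k + 1 : Nat) : Int) + 1 = ((k : Int) + 1) + 1 by push_cast; ring,
        PySem.List.pyRange_one_succ_right h]
    push_cast
    simp only [List.sum_append, List.sum_cons, List.sum_nil]
    nlinarith [ih]

-- the two loop bodies are the same function
theorem pv_body_eq (x y : Int) :
    (fun (total i : Int) =>
      if 1 ≤ PySem.Str.count (PySem.Int.toStr i) (PySem.Int.toStr x)
          ∨ 1 ≤ PySem.Str.count (PySem.Int.toStr i) (PySem.Int.toStr y)
      then total else total + i)
    = (fun (total i : Int) =>
      if PySem.Str.isIn (PySem.Int.toStr x) (PySem.Int.toStr i) = true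
          ∨ PySem.Str.isIn (PySem.Int.toStr y) (PySem.Int.toStr i) = true
      then total else total + i) := by
  funext total i
  apply if_congr _ rfl rfl
  have hx := pv_count_pos_iff (PySem.Int.toStr i).toList (PySem.Int.toStr x).toList
    (by simpa [PySem.Int.toStr] using pv_toChars_ne_nil x)
  have hy := pv_count_pos_iff (PySem.Int.toStr i).toList (PySem.Int.toStr y).toList
    (by simpa [PySem.Int.toStr] using pv_toChars_ne_nil y)
  simp only [PySem.Str.count_eq, PySem.Str.isIn_eq]
  exact or_congr hx hy

-- ===== VERDICT (by name: the statement is the Claim_ definition above) =====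
theorem sumOfInteger_spec : Claim_equal_sumOfInteger := by
  intro n x y _
  unfold Spec_sumOfInteger sumOfInteger sumOfInteger_alt
  by_cases hn : n < 1
  · rw [if_pos hn, PySem.List.pyRange_one_eq_nil (by omega)]
    simp
  · rw [if_neg hn]
    push Not at hn
    set l := PySem.List.pyRange 1 (n + 1) 1 with hl
    set p : Int → Prop := fun i =>
      PySem.Str.isIn (PySem.Int.toStr x) (PySem.Int.toStr i) = true
        ∨ PySem.Str.isIn (PySem.Int.toStr y) (PySem.Int.toStr i) = true with hpdef
    have hsplit := pv_fold_split p l 0 0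
    have hsum : l.sum * 2 = n * (n + 1) := by
      have hnn : n = ((n.toNat : Int)) := (Int.toNat_of_nonneg (by omega)).symm
      rw [hl, hnn]
      exact pv_gauss n.toNat
    have hfd : PySem.Int.floordiv (n * (n + 1)) 2 = l.sum := by
      rw [PySem.Int.floordiv_eq_ediv_of_pos (by norm_num)]
      omega
    rw [pv_body_eq x y, hfd]
    simp only [hpdef] at hsplit ⊢
    omega
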